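-- pv_equiv track=rewrite | github.com/kazimc4n/My_Notes | Movie/PART2c.py | is_there_a_solution_C2
-- ===== SOURCE A (Python) =====
-- def is_there_a_solution_C2(num_of_chars, num_of_subgroups, num_searts_in_a_slot, seat_config):
--     chars_per_subgroup = num_of_chars // num_of_subgroups
--     available_seats = 0
--
--     seat_slots = seat_config.split("|")
--
--     for slot in seat_slots:
--         if "O" * chars_per_subgroup in slot:
--             available_seats += 1
-- #conditions
--     if available_seats >= num_of_subgroups:
--         return "YES"
--     else:
--         return "NO"
-- ===== SOURCE B (Python) =====
-- def is_there_a_solution_C2(num_of_chars, num_of_subgroups, num_searts_in_a_slot, seat_config):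
--     chars_per_subgroup = num_of_chars // num_of_subgroups
--     available_seats = 0
--     for slot in seat_config.split("|"):
--         run = 0
--         best = 0
--         for ch in slot:
--             if ch == "O":
--                 run += 1
--                 if run > best:
--                     best = run
--             else:
--                 run = 0
--         if best >= chars_per_subgroup:
--             available_seats += 1
--     return "YES" if available_seats >= num_of_subgroups else "NO"
-- ===== Notes on version B (the rewrite author's own statement) =====
-- stated objective: alternative
-- what changed: Replaces the per-slot substring search for the pattern 'O'*k by a run-length scan that tracks the current and maximal consecutive-'O' run of each slot and compares the maximum with k (k<=0 behaves like the empty pattern since the maximum starts at 0).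
import Mathlib
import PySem

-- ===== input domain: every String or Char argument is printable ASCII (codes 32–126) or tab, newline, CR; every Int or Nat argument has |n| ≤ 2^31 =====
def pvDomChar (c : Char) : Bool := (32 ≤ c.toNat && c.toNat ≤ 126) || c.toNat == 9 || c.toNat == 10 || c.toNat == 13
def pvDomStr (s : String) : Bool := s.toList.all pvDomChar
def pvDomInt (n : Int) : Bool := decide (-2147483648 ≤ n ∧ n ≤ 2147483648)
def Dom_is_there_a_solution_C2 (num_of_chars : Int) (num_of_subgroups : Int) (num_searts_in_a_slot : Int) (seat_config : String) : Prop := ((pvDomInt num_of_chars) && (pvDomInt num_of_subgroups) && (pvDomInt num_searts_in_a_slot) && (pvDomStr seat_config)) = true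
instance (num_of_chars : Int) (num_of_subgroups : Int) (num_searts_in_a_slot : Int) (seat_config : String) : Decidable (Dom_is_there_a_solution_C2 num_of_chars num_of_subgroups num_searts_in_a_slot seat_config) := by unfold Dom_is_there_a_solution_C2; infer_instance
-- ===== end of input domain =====

-- B replaces A's per-slot substring search for 'O'*k by a single run-length scan of each slot (alternative algorithm, no speed claim); num_of_subgroups = 0 (ZeroDivisionError in A and B) is excluded by Pre_.


-- ===== PORT A =====
def is_there_a_solution_C2 (num_of_chars : Int) (num_of_subgroups : Int) (num_searts_in_a_slot : Int) (seat_config : String) : String :=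
  let chars_per_subgroup := PySem.Int.floordiv num_of_chars num_of_subgroups
  let pattern := PySem.List.pyRepeat ['O'] chars_per_subgroup
  let seat_slots := PySem.Chars.splitOn seat_config.toList ['|']
  let available_seats : Int := seat_slots.foldl
    (fun acc slot => if PySem.Chars.isIn pattern slot then acc + 1 else acc) 0
  if available_seats ≥ num_of_subgroups then "YES" else "NO"


-- ===== PORT B =====
-- one slot's inner loop of B: (run, best) over the slot's characters
def pvSlotScan (slot : List Char) : Int × Int :=
  slot.foldl (fun (p : Int × Int) ch =>
    if ch = 'O' then (p.1 + 1, if p.1 + 1 > p.2 then p.1 + 1 else p.2)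
    else (0, p.2)) (0, 0)

def is_there_a_solution_C2_alt (num_of_chars : Int) (num_of_subgroups : Int) (num_searts_in_a_slot : Int) (seat_config : String) : String :=
  let chars_per_subgroup := PySem.Int.floordiv num_of_chars num_of_subgroups
  let available_seats : Int := (PySem.Chars.splitOn seat_config.toList ['|']).foldl
    (fun acc slot => if (pvSlotScan slot).2 ≥ chars_per_subgroup then acc + 1 else acc) 0
  if available_seats ≥ num_of_subgroups then "YES" else "NO"


-- ===== PRECONDITION & SPEC =====
-- Pre_ excludes num_of_subgroups = 0, on which Python's '//' raises ZeroDivisionError.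
def Pre_is_there_a_solution_C2 (num_of_chars : Int) (num_of_subgroups : Int) (num_searts_in_a_slot : Int) (seat_config : String) : Prop := num_of_subgroups ≠ 0
instance (num_of_chars : Int) (num_of_subgroups : Int) (num_searts_in_a_slot : Int) (seat_config : String) : Decidable (Pre_is_there_a_solution_C2 num_of_chars num_of_subgroups num_searts_in_a_slot seat_config) := by unfold Pre_is_there_a_solution_C2; infer_instance
def pvWitness_is_there_a_solution_C2 : Int × Int × Int × String := (4, 2, 4, "OO|XX|OO")

def Spec_is_there_a_solution_C2 (num_of_chars : Int) (num_of_subgroups : Int) (num_searts_in_a_slot : Int) (seat_config : String) (out : String) : Prop := out = is_there_a_solution_C2_alt num_of_chars num_of_subgroups num_searts_in_a_slot seat_config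
instance (num_of_chars : Int) (num_of_subgroups : Int) (num_searts_in_a_slot : Int) (seat_config : String) (out : String) : Decidable (Spec_is_there_a_solution_C2 num_of_chars num_of_subgroups num_searts_in_a_slot seat_config out) := by unfold Spec_is_there_a_solution_C2; infer_instance

-- ===== CLAIM (what is proved, stated in full; the proofs are below) =====
def Claim_equal_is_there_a_solution_C2 : Prop := ∀ (num_of_chars : Int) (num_of_subgroups : Int) (num_searts_in_a_slot : Int) (seat_config : String), Dom_is_there_a_solution_C2 num_of_chars num_of_subgroups num_searts_in_a_slot seat_config → Pre_is_there_a_solution_C2 num_of_chars num_of_subgroups num_searts_in_a_slot seat_config → Spec_is_there_a_solution_C2 num_of_chars num_of_subgroups num_searts_in_a_slot seat_config (is_there_a_solution_C2 num_of_chars num_of_subgroups num_searts_in_a_slot seat_config)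

-- ===== LEMMAS AND PROOFS =====

-- g r l : the maximal 'O'-run of (replicate r 'O' ++ l), as a Nat recursion on l
def pvG (r : Nat) : List Char → Nat
  | [] => r
  | c :: t => if c = 'O' then pvG (r + 1) t else max r (pvG 0 t)

theorem pvG_le (r : Nat) (l : List Char) : r ≤ pvG r l := by
  induction l generalizing r with
  | nil => simp [pvG]
  | cons c t ih =>
    simp only [pvG]
    split
    · exact le_trans (Nat.le_succ r) (ih (r + 1))
    · exact le_max_left _ _

-- B's (run, best) fold computes max b (pvG r l), cast to Int
theorem pvSlotScan_go (l : List Char) : ∀ (r b : Nat),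
    r ≤ b →
    (l.foldl (fun (p : Int × Int) ch =>
      if ch = 'O' then (p.1 + 1, if p.1 + 1 > p.2 then p.1 + 1 else p.2)
      else (0, p.2)) ((r : Int), (b : Int))).2 = (max b (pvG r l) : Nat) := by
  induction l with
  | nil =>
    intro r b hrb
    simp [pvG, Nat.max_eq_left hrb]
  | cons c t ih =>
    intro r b hrb
    simp only [List.foldl_cons]
    by_cases hc : c = 'O'
    · subst hc
      have h1 : (((r : Int) + 1, if (r : Int) + 1 > (b : Int) then (r : Int) + 1 else (b : Int)) : Int × Int)
          = (((r + 1 : Nat) : Int), ((max b (r + 1) : Nat) : Int)) := by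
        rw [Prod.mk.injEq]
        refine ⟨by push_cast; ring, ?_⟩
        split_ifs with h
        · push_cast at h ⊢; omega
        · push_cast at h ⊢; omega
      rw [if_pos rfl, h1, ih (r + 1) (max b (r + 1)) (le_max_right _ _)]
      have hg : pvG r ('O' :: t) = pvG (r + 1) t := by simp [pvG]
      rw [hg]
      have := pvG_le (r + 1) t
      congr 1
      omega
    · rw [if_neg hc]
      have h0 := ih 0 b (Nat.zero_le b)
      simp only [Nat.cast_zero] at h0
      rw [h0]
      have hg : pvG r (c :: t) = max r (pvG 0 t) := by simp [pvG, hc]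
      rw [hg]
      congr 1
      omega

theorem pvSlotScan_eq (slot : List Char) : (pvSlotScan slot).2 = (pvG 0 slot : Nat) := by
  have := pvSlotScan_go slot 0 0 (le_refl 0)
  simpa [pvSlotScan] using this

-- a block of 'O's cannot cross a non-'O' character: infix with c ∉ m splits
theorem pvInfix_split {m l₁ l₂ : List Char} {c : Char} (hc : c ∉ m) :
    m <:+: (l₁ ++ c :: l₂) ↔ m <:+: l₁ ∨ m <:+: l₂ := by
  constructor
  · intro h
    induction l₁ with
    | nil =>
      rcases List.infix_cons_iff.mp h with hp | hi
      · rcases hp with ⟨u, hu⟩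
        cases m with
        | nil => exact Or.inl (List.nil_infix)
        | cons a s =>
          exfalso
          apply hc
          have ha : a = c := by
            have := congrArg (fun l => l.head?) hu
            simpa using this
          simp [ha]
      · exact Or.inr hi
    | cons a t ih =>
      rw [List.cons_append, List.infix_cons_iff] at h
      rcases h with hp | hi
      · rw [← List.cons_append] at hp
        rcases Nat.lt_or_ge (a :: t).length m.length with hlen | hlen
        · exfalso
          apply hc
          have hm : m[(a :: t).length]'hlen = ((a :: t) ++ c :: l₂)[(a :: t).length]'(by
              simp) := hp.getElem hlen
          have hcc : ((a :: t) ++ c :: l₂)[(a :: t).length]'(by simp) = c := by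
            rw [List.getElem_append_right (le_refl _)]
            simp
          rw [hcc] at hm
          exact hm ▸ List.getElem_mem hlen
        · left
          have hx : (a :: t) <+: (a :: t) ++ c :: l₂ := List.prefix_append _ _
          exact (List.prefix_of_prefix_length_le hp hx hlen).isInfix
      · rcases ih hi with h1 | h2
        · exact Or.inl (h1.trans (List.suffix_cons a t).isInfix)
        · exact Or.inr h2
  · intro h
    rcases h with h | h
    · exact h.trans ⟨[], c :: l₂, by simp⟩
    · exact h.trans ⟨l₁ ++ [c], [], by simp⟩

theorem pvReplicate_infix_replicate {n r : Nat} :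
    List.replicate n 'O' <:+: List.replicate r 'O' ↔ n ≤ r := by
  constructor
  · intro h
    simpa using h.length_le
  · intro h
    refine List.IsPrefix.isInfix ⟨List.replicate (r - n) 'O', ?_⟩
    rw [← List.replicate_add]
    congr 1
    omega

-- characterisation: replicate n 'O' is an infix of replicate r 'O' ++ l iff n ≤ pvG r l
theorem pvInfix_iff_pvG (l : List Char) : ∀ (r n : Nat),
    (List.replicate n 'O' <:+: (List.replicate r 'O' ++ l)) ↔ n ≤ pvG r l := by
  induction l with
  | nil =>
    intro r n
    simp only [List.append_nil, pvG]
    exact pvReplicate_infix_replicate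
  | cons c t ih =>
    intro r n
    by_cases hc : c = 'O'
    · subst hc
      have hrw : List.replicate r 'O' ++ 'O' :: t = List.replicate (r + 1) 'O' ++ t := by
        rw [List.replicate_succ']
        simp
      rw [hrw, ih (r + 1) n]
      simp [pvG]
    · have hcm : c ∉ List.replicate n 'O' := by
        intro hmem
        exact hc (List.eq_of_mem_replicate hmem)
      rw [pvInfix_split hcm, pvReplicate_infix_replicate]
      have h0 : List.replicate n 'O' <:+: t ↔ n ≤ pvG 0 t := by
        simpa using ih 0 n
      rw [h0]
      simp only [pvG, if_neg hc]
      omega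

-- per-slot: A's substring test equals B's run-length test
theorem pvCond_eq (k : Int) (slot : List Char) :
    PySem.Chars.isIn (PySem.List.pyRepeat ['O'] k) slot = decide (k ≤ (pvSlotScan slot).2) := by
  rw [PySem.List.pyRepeat_singleton, pvSlotScan_eq]
  have hiff : List.replicate k.toNat 'O' <:+: slot ↔ k.toNat ≤ pvG 0 slot := by
    simpa using pvInfix_iff_pvG slot 0 k.toNat
  by_cases h : List.replicate k.toNat 'O' <:+: slot
  · rw [(PySem.Chars.isIn_iff_infix _ _).mpr h, eq_comm, decide_eq_true_iff]
    have := hiff.mp h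
    omega
  · rw [(PySem.Chars.isIn_eq_false_iff _ _).mpr h, eq_comm, decide_eq_false_iff_not]
    intro hk
    exact h (hiff.mpr (by omega))

-- ===== VERDICT (by name: the statement is the Claim_ definition above) =====
theorem is_there_a_solution_C2_spec : Claim_equal_is_there_a_solution_C2 := by
  intro num_of_chars num_of_subgroups num_searts_in_a_slot seat_config _hdom _hpre
  show _ = _
  simp only [is_there_a_solution_C2, is_there_a_solution_C2_alt, pvCond_eq,
    ge_iff_le, decide_eq_true_eq]
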